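-- pv_equiv track=rewrite | github.com/miliar/Code_Jam_Webscraper | Solutions_in_python/Problem_143/b_lottery.py | generateWins
-- ===== SOURCE A (Python) =====
-- def generateWins(a, b, k):
--     winPossibilities = []
--     for i in range(0, a):
--         for j in range(0, b):
--             winPossibilities.append([i, j])
--
--     numWins = 0
--     K = int(k)
--     for possibleWin in winPossibilities:
--         if possibleWin[0] & possibleWin[1] < K:
--             numWins += 1
--     return numWins
-- ===== SOURCE B (Python) =====
-- def generateWins(a, b, k):
--     # Counts pairs (i, j), 0 <= i < a, 0 <= j < b, with (i & j) < K,
--     # by divide and conquer on the last bit of i and j, with memoisation.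
--     K = int(k)
--     memo = {}
--
--     def wins(a, b, k):
--         if a <= 0 or b <= 0 or k <= 0:
--             return 0
--         if k >= min(a, b):
--             # i & j <= min(i, j) < min(a, b) <= k for every pair
--             return a * b
--         key = (a, b, k)
--         if key in memo:
--             return memo[key]
--         # split i = 2i' + bi, j = 2j' + bj; (i & j) = 2*(i' & j') + (bi & bj)
--         r = (wins((a + 1) // 2, (b + 1) // 2, (k + 1) // 2)
--              + wins(a // 2, (b + 1) // 2, (k + 1) // 2)
--              + wins((a + 1) // 2, b // 2, (k + 1) // 2)
--              + wins(a // 2, b // 2, k // 2))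
--         memo[key] = r
--         return r
--
--     return wins(a, b, K)
-- ===== Notes on version B (the rewrite author's own statement) =====
-- stated objective: faster
-- what changed: Replaced A's materialised a*b cross-product and linear counting scan by a memoised bitwise divide-and-conquer on the last bits of i and j, counting pairs with (i & j) < K in polylogarithmic time.
import Mathlib
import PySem

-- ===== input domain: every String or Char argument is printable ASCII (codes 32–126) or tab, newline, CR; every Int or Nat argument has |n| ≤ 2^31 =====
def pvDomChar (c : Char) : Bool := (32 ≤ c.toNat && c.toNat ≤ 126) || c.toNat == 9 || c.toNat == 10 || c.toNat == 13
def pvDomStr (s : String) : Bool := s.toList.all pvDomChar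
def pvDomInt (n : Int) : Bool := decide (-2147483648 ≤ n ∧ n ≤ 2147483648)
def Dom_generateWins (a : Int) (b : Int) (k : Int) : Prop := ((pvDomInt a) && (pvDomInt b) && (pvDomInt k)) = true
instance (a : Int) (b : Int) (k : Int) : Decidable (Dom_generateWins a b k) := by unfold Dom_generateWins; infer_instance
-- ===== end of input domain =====

-- B replaces A's materialised a*b cross-product scan by a memoised bitwise
-- divide-and-conquer on the last bits of i and j (equal return value, no observable mutation).

-- ===== PORT A =====
-- Python's inner two-element list [i, j] is rendered as the pair (i, j);
-- 'possibleWin[0] & possibleWin[1] < K' parses in Python as '(i & j) < K' (& binds tighter).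
def generateWins (a : Int) (b : Int) (k : Int) : Int :=
  let winPossibilities : Array (Int × Int) :=
    (PySem.List.pyRange 0 a 1).foldl (fun acc i =>
      (PySem.List.pyRange 0 b 1).foldl (fun acc2 j => acc2.push (i, j)) acc) #[]
  let K := k
  winPossibilities.foldl (fun numWins possibleWin =>
    if Int.land possibleWin.1 possibleWin.2 < K then numWins + 1 else numWins) 0

-- ===== PORT B =====
-- the inner recursive function 'wins' of Source B, threading the memo dict explicitly;
-- fuel is only a structural-termination guard: the recursion depth is below a.toNat + 1
def winsGo (fuel : Nat) (memo : PySem.Dict (Int × Int × Int) Int) (a b k : Int) :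
    PySem.Dict (Int × Int × Int) Int × Int :=
  match fuel with
  | 0 => (memo, 0)
  | fuel + 1 =>
    if a ≤ 0 ∨ b ≤ 0 ∨ k ≤ 0 then (memo, 0)
    else if min a b ≤ k then (memo, a * b)
    else
      match memo.get? (a, b, k) with
      | some v => (memo, v)
      | none =>
        let p1 := winsGo fuel memo (PySem.Int.floordiv (a + 1) 2) (PySem.Int.floordiv (b + 1) 2) (PySem.Int.floordiv (k + 1) 2)
        let p2 := winsGo fuel p1.1 (PySem.Int.floordiv a 2) (PySem.Int.floordiv (b + 1) 2) (PySem.Int.floordiv (k + 1) 2)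
        let p3 := winsGo fuel p2.1 (PySem.Int.floordiv (a + 1) 2) (PySem.Int.floordiv b 2) (PySem.Int.floordiv (k + 1) 2)
        let p4 := winsGo fuel p3.1 (PySem.Int.floordiv a 2) (PySem.Int.floordiv b 2) (PySem.Int.floordiv k 2)
        let r := p1.2 + p2.2 + p3.2 + p4.2
        (p4.1.insert (a, b, k) r, r)

def generateWins_alt (a : Int) (b : Int) (k : Int) : Int :=
  let K := k
  (winsGo (a.toNat + 1) PySem.Dict.empty a b K).2

-- ===== PRECONDITION & SPEC =====
def Spec_generateWins (a : Int) (b : Int) (k : Int) (out : Int) : Prop := out = generateWins_alt a b k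
instance (a : Int) (b : Int) (k : Int) (out : Int) : Decidable (Spec_generateWins a b k out) := by unfold Spec_generateWins; infer_instance

-- ===== CLAIM (what is proved, stated in full; the proofs are below) =====
def Claim_equal_generateWins : Prop := ∀ (a : Int) (b : Int) (k : Int), Dom_generateWins a b k → Spec_generateWins a b k (generateWins a b k)

-- ===== LEMMAS AND PROOFS =====

-- the memo-free version of winsGo, for the proofs
def winsF (a b k : Int) : Int :=
  if a ≤ 0 ∨ b ≤ 0 ∨ k ≤ 0 then 0
  else if min a b ≤ k then a * b
  else winsF ((a + 1) / 2) ((b + 1) / 2) ((k + 1) / 2) + winsF (a / 2) ((b + 1) / 2) ((k + 1) / 2)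
       + winsF ((a + 1) / 2) (b / 2) ((k + 1) / 2) + winsF (a / 2) (b / 2) (k / 2)
termination_by a.toNat
decreasing_by all_goals omega

-- Nat-level counterpart of winsF
def winsN (na nb nk : Nat) : Nat :=
  if na = 0 ∨ nb = 0 ∨ nk = 0 then 0
  else if min na nb ≤ nk then na * nb
  else winsN ((na + 1) / 2) ((nb + 1) / 2) ((nk + 1) / 2) + winsN (na / 2) ((nb + 1) / 2) ((nk + 1) / 2)
       + winsN ((na + 1) / 2) (nb / 2) ((nk + 1) / 2) + winsN (na / 2) (nb / 2) (nk / 2)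
termination_by na
decreasing_by all_goals omega

-- the brute-force count, Nat level
def countA (na nb nk : Nat) : Nat :=
  ((List.range na).map (fun i => (List.range nb).countP (fun j => i &&& j < nk))).sum

def MemoOK (memo : PySem.Dict (Int × Int × Int) Int) : Prop :=
  ∀ x y z v, memo.get? (x, y, z) = some v → v = winsF x y z

lemma winsGo_spec (n : Nat) : ∀ (a b k : Int) (memo : PySem.Dict (Int × Int × Int) Int),
    a.toNat < n → MemoOK memo →
    (winsGo n memo a b k).2 = winsF a b k ∧ MemoOK (winsGo n memo a b k).1 := by
  induction n with
  | zero => intro a b k memo hna; omega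
  | succ n ih =>
    intro a b k memo hna hm
    by_cases h0 : a ≤ 0 ∨ b ≤ 0 ∨ k ≤ 0
    · rw [winsGo, winsF, if_pos h0, if_pos h0]
      exact ⟨rfl, hm⟩
    · by_cases h1 : min a b ≤ k
      · rw [winsGo, winsF, if_neg h0, if_pos h1, if_neg h0, if_pos h1]
        exact ⟨rfl, hm⟩
      · have hk1 : 1 ≤ k := by omega
        have ha2 : 2 ≤ a := by omega
        rw [winsGo, if_neg h0, if_neg h1]
        cases hget : memo.get? (a, b, k) with
        | some v =>
          exact ⟨hm a b k v hget, hm⟩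
        | none =>
          simp only [PySem.Int.floordiv_eq_ediv_of_pos (by norm_num : (0:Int) < 2)]
          obtain ⟨e1, m1⟩ := ih ((a + 1) / 2) ((b + 1) / 2) ((k + 1) / 2) memo (by omega) hm
          obtain ⟨e2, m2⟩ := ih (a / 2) ((b + 1) / 2) ((k + 1) / 2) _ (by omega) m1
          obtain ⟨e3, m3⟩ := ih ((a + 1) / 2) (b / 2) ((k + 1) / 2) _ (by omega) m2
          obtain ⟨e4, m4⟩ := ih (a / 2) (b / 2) (k / 2) _ (by omega) m3
          have hval : (winsGo n memo ((a + 1) / 2) ((b + 1) / 2) ((k + 1) / 2)).2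
              + (winsGo n (winsGo n memo ((a + 1) / 2) ((b + 1) / 2) ((k + 1) / 2)).1 (a / 2) ((b + 1) / 2) ((k + 1) / 2)).2
              + (winsGo n (winsGo n (winsGo n memo ((a + 1) / 2) ((b + 1) / 2) ((k + 1) / 2)).1 (a / 2) ((b + 1) / 2) ((k + 1) / 2)).1 ((a + 1) / 2) (b / 2) ((k + 1) / 2)).2
              + (winsGo n (winsGo n (winsGo n (winsGo n memo ((a + 1) / 2) ((b + 1) / 2) ((k + 1) / 2)).1 (a / 2) ((b + 1) / 2) ((k + 1) / 2)).1 ((a + 1) / 2) (b / 2) ((k + 1) / 2)).1 (a / 2) (b / 2) (k / 2)).2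
              = winsF a b k := by
            rw [e1, e2, e3, e4]
            conv_rhs => rw [winsF]
            rw [if_neg h0, if_neg h1]
          refine ⟨hval, ?_⟩
          intro x y z v hv
          rw [PySem.Dict.get?_insert] at hv
          by_cases hxyz : (x, y, z) = ((a, b, k) : Int × Int × Int)
          · rw [if_pos hxyz] at hv
            obtain ⟨hx, hy, hz⟩ : x = a ∧ y = b ∧ z = k := by
              simpa [Prod.ext_iff] using hxyz
            subst hx; subst hy; subst hz
            rw [← Option.some.inj hv]
            exact hval
          · rw [if_neg hxyz] at hv
            exact m4 x y z v hv

lemma winsF_cast (n : Nat) : ∀ (a b k : Int), a.toNat ≤ n →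
    winsF a b k = ((winsN a.toNat b.toNat k.toNat : Nat) : Int) := by
  induction n with
  | zero =>
    intro a b k hna
    have h : a ≤ 0 := by omega
    rw [winsF, winsN, if_pos (Or.inl h), if_pos (Or.inl (by omega : a.toNat = 0))]
    simp
  | succ n ih =>
    intro a b k hna
    by_cases h0 : a ≤ 0 ∨ b ≤ 0 ∨ k ≤ 0
    · rw [winsF, winsN, if_pos h0, if_pos (by omega : a.toNat = 0 ∨ b.toNat = 0 ∨ k.toNat = 0)]
      simp
    · by_cases h1 : min a b ≤ k
      · rw [winsF, winsN, if_neg h0, if_neg (by omega : ¬(a.toNat = 0 ∨ b.toNat = 0 ∨ k.toNat = 0)),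
            if_pos h1, if_pos (by omega : min a.toNat b.toNat ≤ k.toNat)]
        rw [Nat.cast_mul, Int.toNat_of_nonneg (by omega), Int.toNat_of_nonneg (by omega)]
      · rw [winsF, winsN, if_neg h0, if_neg (by omega : ¬(a.toNat = 0 ∨ b.toNat = 0 ∨ k.toNat = 0)),
            if_neg h1, if_neg (by omega : ¬ min a.toNat b.toNat ≤ k.toNat)]
        have ha2 : 2 ≤ a := by omega
        rw [ih ((a + 1) / 2) ((b + 1) / 2) ((k + 1) / 2) (by omega),
            ih (a / 2) ((b + 1) / 2) ((k + 1) / 2) (by omega),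
            ih ((a + 1) / 2) (b / 2) ((k + 1) / 2) (by omega),
            ih (a / 2) (b / 2) (k / 2) (by omega)]
        rw [(by omega : ((a + 1) / 2).toNat = (a.toNat + 1) / 2),
            (by omega : ((b + 1) / 2).toNat = (b.toNat + 1) / 2),
            (by omega : ((k + 1) / 2).toNat = (k.toNat + 1) / 2),
            (by omega : (a / 2).toNat = a.toNat / 2),
            (by omega : (b / 2).toNat = b.toNat / 2),
            (by omega : (k / 2).toNat = k.toNat / 2)]
        push_cast
        ring

lemma sum_map_add (l : List Nat) (f g : Nat → Nat) :
    (l.map (fun x => f x + g x)).sum = (l.map f).sum + (l.map g).sum := by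
  induction l with
  | nil => simp
  | cons x xs ih => simp [ih]; omega

lemma sum_split (f : Nat → Nat) (n : Nat) :
    ((List.range n).map f).sum
      = ((List.range ((n + 1) / 2)).map (fun m => f (2 * m))).sum
        + ((List.range (n / 2)).map (fun m => f (2 * m + 1))).sum := by
  induction n with
  | zero => simp
  | succ n ih =>
    rcases Nat.even_or_odd n with ⟨m, hm⟩ | ⟨m, hm⟩
    · subst hm
      rw [List.range_succ, List.map_append, List.sum_append, ih]
      simp only [show (m + m + 1) / 2 = m by omega, show (m + m) / 2 = m by omega,
                 show (m + m + 1 + 1) / 2 = m + 1 by omega]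
      have hse : ((List.range (m + 1)).map (fun x => f (2 * x))).sum
          = ((List.range m).map (fun x => f (2 * x))).sum + f (2 * m) := by
        rw [List.range_succ]; simp
      have hmm : m + m = 2 * m := by omega
      rw [hmm, hse]; simp; omega
    · subst hm
      rw [List.range_succ, List.map_append, List.sum_append, ih]
      simp only [show (2 * m + 1 + 1) / 2 = m + 1 by omega, show (2 * m + 1) / 2 = m by omega,
                 show (2 * m + 1 + 1 + 1) / 2 = m + 1 by omega]
      have hso : ((List.range (m + 1)).map (fun x => f (2 * x + 1))).sum
          = ((List.range m).map (fun x => f (2 * x + 1))).sum + f (2 * m + 1) := by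
        rw [List.range_succ]; simp
      rw [hso]; simp; omega

lemma countP_eq_sum {α : Type} (l : List α) (P : α → Bool) :
    l.countP P = (l.map (fun x => if P x then 1 else 0)).sum := by
  induction l with
  | nil => simp
  | cons x xs ih => by_cases h : P x <;> simp [h, ih, Nat.add_comm]

lemma countP_split (P : Nat → Bool) (n : Nat) :
    (List.range n).countP P
      = (List.range ((n + 1) / 2)).countP (fun m => P (2 * m))
        + (List.range (n / 2)).countP (fun m => P (2 * m + 1)) := by
  simp only [countP_eq_sum]
  exact sum_split (fun x => if P x then 1 else 0) n

lemma land_ee (a b : Nat) : (2 * a) &&& (2 * b) = 2 * (a &&& b) := by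
  simpa [Nat.bit] using Nat.land_bit false a false b
lemma land_oe (a b : Nat) : (2 * a + 1) &&& (2 * b) = 2 * (a &&& b) := by
  simpa [Nat.bit] using Nat.land_bit true a false b
lemma land_eo (a b : Nat) : (2 * a) &&& (2 * b + 1) = 2 * (a &&& b) := by
  simpa [Nat.bit] using Nat.land_bit false a true b
lemma land_oo (a b : Nat) : (2 * a + 1) &&& (2 * b + 1) = 2 * (a &&& b) + 1 := by
  simpa [Nat.bit] using Nat.land_bit true a true b

lemma countA_eq_winsN (n : Nat) : ∀ (na nb nk : Nat), na ≤ n → countA na nb nk = winsN na nb nk := by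
  induction n with
  | zero =>
    intro na nb nk hna
    have : na = 0 := by omega
    subst this
    rw [winsN]; simp [countA]
  | succ n ih =>
    intro na nb nk hna
    rw [winsN]
    by_cases h0 : na = 0 ∨ nb = 0 ∨ nk = 0
    · rw [if_pos h0]
      rcases h0 with h | h | h <;> subst h <;> simp [countA]
    · rw [if_neg h0]
      by_cases h1 : min na nb ≤ nk
      · rw [if_pos h1]
        unfold countA
        have hall : ∀ i < na, (List.range nb).countP (fun j => i &&& j < nk) = nb := by
          intro i hi
          have : ∀ j ∈ List.range nb, (fun j => decide (i &&& j < nk)) j = true := by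
            intro j hj
            simp only [List.mem_range] at hj
            have hl : i &&& j ≤ i := Nat.and_le_left
            have hr : i &&& j ≤ j := Nat.and_le_right
            simp only [decide_eq_true_eq]
            omega
          rw [List.countP_eq_length.mpr this, List.length_range]
        calc ((List.range na).map (fun i => (List.range nb).countP (fun j => i &&& j < nk))).sum
            = ((List.range na).map (fun _ => nb)).sum := by
              apply congrArg
              apply List.map_congr_left
              intro i hi
              exact hall i (List.mem_range.mp hi)
          _ = na * nb := by simp [List.map_const']
      · rw [if_neg h1]
        have hna2 : 2 ≤ na := by omega
        have hc1 : (na + 1) / 2 ≤ n := by omega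
        have hc2 : na / 2 ≤ n := by omega
        -- split the outer range by parity of i
        unfold countA
        rw [sum_split]
        -- split each inner count by parity of j, and push the parity through &&&
        have inner_even : ∀ i' : Nat,
            (List.range nb).countP (fun j => (2 * i') &&& j < nk)
              = (List.range ((nb + 1) / 2)).countP (fun j' => i' &&& j' < (nk + 1) / 2)
                + (List.range (nb / 2)).countP (fun j' => i' &&& j' < (nk + 1) / 2) := by
          intro i'
          rw [countP_split]
          congr 1
          · apply List.countP_congr
            intro j' _
            simp only [land_ee, decide_eq_true_eq]
            generalize i' &&& j' = x
            omega
          · apply List.countP_congr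
            intro j' _
            simp only [land_eo, decide_eq_true_eq]
            generalize i' &&& j' = x
            omega
        have inner_odd : ∀ i' : Nat,
            (List.range nb).countP (fun j => (2 * i' + 1) &&& j < nk)
              = (List.range ((nb + 1) / 2)).countP (fun j' => i' &&& j' < (nk + 1) / 2)
                + (List.range (nb / 2)).countP (fun j' => i' &&& j' < nk / 2) := by
          intro i'
          rw [countP_split]
          congr 1
          · apply List.countP_congr
            intro j' _
            simp only [land_oe, decide_eq_true_eq]
            generalize i' &&& j' = x
            omega
          · apply List.countP_congr
            intro j' _
            simp only [land_oo, decide_eq_true_eq]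
            generalize i' &&& j' = x
            omega
        calc ((List.range ((na + 1) / 2)).map (fun m => (List.range nb).countP (fun j => 2 * m &&& j < nk))).sum
              + ((List.range (na / 2)).map (fun m => (List.range nb).countP (fun j => (2 * m + 1) &&& j < nk))).sum
            = (((List.range ((na + 1) / 2)).map (fun i' => (List.range ((nb + 1) / 2)).countP (fun j' => i' &&& j' < (nk + 1) / 2))).sum
                + ((List.range ((na + 1) / 2)).map (fun i' => (List.range (nb / 2)).countP (fun j' => i' &&& j' < (nk + 1) / 2))).sum)
              + (((List.range (na / 2)).map (fun i' => (List.range ((nb + 1) / 2)).countP (fun j' => i' &&& j' < (nk + 1) / 2))).sum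
                + ((List.range (na / 2)).map (fun i' => (List.range (nb / 2)).countP (fun j' => i' &&& j' < nk / 2))).sum) := by
              rw [← sum_map_add, ← sum_map_add]
              congr 1
              · apply congrArg; apply List.map_congr_left; intro i' _; exact inner_even i'
              · apply congrArg; apply List.map_congr_left; intro i' _; exact inner_odd i'
          _ = winsN ((na + 1) / 2) ((nb + 1) / 2) ((nk + 1) / 2) + winsN (na / 2) ((nb + 1) / 2) ((nk + 1) / 2)
              + winsN ((na + 1) / 2) (nb / 2) ((nk + 1) / 2) + winsN (na / 2) (nb / 2) (nk / 2) := by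
              rw [← ih _ _ _ hc1, ← ih _ _ _ hc1, ← ih _ _ _ hc2, ← ih _ _ _ hc2]
              unfold countA
              omega

lemma countP_flatMap' {α β : Type} (l : List α) (g : α → List β) (P : β → Bool) :
    (l.flatMap g).countP P = (l.map (fun x => (g x).countP P)).sum := by
  induction l with
  | nil => simp
  | cons x xs ih => simp [List.flatMap_cons, List.countP_append, ih]

lemma build_inner (l : List Int) (i : Int) (acc : Array (Int × Int)) :
    (l.foldl (fun acc2 j => acc2.push (i, j)) acc).toList = acc.toList ++ l.map (fun j => (i, j)) := by
  induction l generalizing acc with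
  | nil => simp
  | cons x xs ih => rw [List.foldl_cons, ih, Array.toList_push, List.map_cons, List.append_assoc]; rfl

lemma build_outer (l1 l2 : List Int) (acc : Array (Int × Int)) :
    (l1.foldl (fun acc i => l2.foldl (fun acc2 j => acc2.push (i, j)) acc) acc).toList
      = acc.toList ++ l1.flatMap (fun i => l2.map (fun j => (i, j))) := by
  induction l1 generalizing acc with
  | nil => simp
  | cons x xs ih =>
    rw [List.foldl_cons, ih, build_inner, List.flatMap_cons, List.append_assoc]

lemma count_fold (k : Int) (l : List (Int × Int)) (c : Int) :
    l.foldl (fun numWins p => if Int.land p.1 p.2 < k then numWins + 1 else numWins) c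
      = c + ((l.countP (fun p => Int.land p.1 p.2 < k) : Nat) : Int) := by
  induction l generalizing c with
  | nil => simp
  | cons x xs ih =>
    simp only [List.foldl_cons, List.countP_cons, ih]
    by_cases h : Int.land x.1 x.2 < k
    · simp [h]; ring
    · simp [h]

lemma land_cast (m n : Nat) : Int.land (m : Int) (n : Int) = ((m &&& n : Nat) : Int) := by
  simp [Int.land]

lemma generateWins_eq_countA (a b k : Int) :
    generateWins a b k = ((countA a.toNat b.toNat k.toNat : Nat) : Int) := by
  show ((PySem.List.pyRange 0 a 1).foldl (fun acc i =>
      (PySem.List.pyRange 0 b 1).foldl (fun acc2 j => acc2.push (i, j)) acc) #[]).foldl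
      (fun numWins p => if Int.land p.1 p.2 < k then numWins + 1 else numWins) 0
    = ((countA a.toNat b.toNat k.toNat : Nat) : Int)
  rw [← Array.foldl_toList, build_outer, Array.toList_empty, List.nil_append,
      count_fold, countP_flatMap']
  have hr : ∀ c : Int, PySem.List.pyRange 0 c 1 = (List.range c.toNat).map (fun m : Nat => (m : Int)) := by
    intro c
    rw [PySem.List.pyRange_one]
    simp
  rw [hr a, hr b, List.map_map]
  have hinner : ∀ m : Nat,
      ((((List.range b.toNat).map (fun j : Nat => (j : Int))).map (fun j => ((m : Int), j))).countP
          (fun p => Int.land p.1 p.2 < k))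
        = (List.range b.toNat).countP (fun j => m &&& j < k.toNat) := by
    intro m
    rw [List.map_map, List.countP_map]
    apply List.countP_congr
    intro j _
    simp only [Function.comp, land_cast, decide_eq_true_eq]
    generalize m &&& j = x
    omega
  have : ((List.range a.toNat).map
        ((fun i => (((List.range b.toNat).map (fun j : Nat => (j : Int))).map (fun j => (i, j))).countP
          (fun p => Int.land p.1 p.2 < k)) ∘ (fun m : Nat => (m : Int))))
      = (List.range a.toNat).map (fun m => (List.range b.toNat).countP (fun j => m &&& j < k.toNat)) := by
    apply List.map_congr_left
    intro m _
    exact hinner m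
  rw [this]
  unfold countA
  omega

-- ===== VERDICT (by name: the statement is the Claim_ definition above) =====
theorem generateWins_spec : Claim_equal_generateWins := by
  intro a b k _hdom
  unfold Spec_generateWins generateWins_alt
  have h1 := winsGo_spec (a.toNat + 1) a b k PySem.Dict.empty (by omega)
    (by intro x y z v hv; simp [PySem.Dict.get?_empty] at hv)
  rw [generateWins_eq_countA, countA_eq_winsN a.toNat _ _ _ le_rfl,
      ← winsF_cast a.toNat a b k le_rfl]
  exact (h1).1.symm
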